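-- pv_equiv track=rewrite | github.com/balahoncevg/shop_api | 122333444455555.py | give_me_n
-- ===== SOURCE A (Python) =====
-- def give_me_n(n):
--     result = ''
--     current_number = 0
--     try:
--         n = int(n)
--     except ValueError:
--         return 'Нужно целое положительное число от 1'
--     if n < 1:
--         return 'Нужно целое положительное число от 1'
--     while True:
--         current_number += 1
--         result = f'{result}{str(current_number)*current_number}'
--         if len(result) >= n:
--             result = result[:n]
--             break
--     return result
-- ===== SOURCE B (Python) =====
-- import math
--
-- def give_me_n(n):
--     try:
--         n = int(n)
--     except ValueError:
--         return 'Нужно целое положительное число от 1'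
--     if n < 1:
--         return 'Нужно целое положительное число от 1'
--     # smallest k with k*(k+1)//2 >= n, found analytically instead of by accumulating
--     k = (math.isqrt(8 * n - 7) + 1) // 2
--     return ''.join(str(i) * i for i in range(1, k + 1))[:n]
-- ===== Notes on version B (the rewrite author's own statement) =====
-- stated objective: alternative
-- what changed: A grows the result block by block and re-measures its length each iteration to decide when to stop; B computes the stopping block count analytically from the triangular-number inequality via math.isqrt, then generates the answer in one join-and-slice pass.
import Mathlib
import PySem

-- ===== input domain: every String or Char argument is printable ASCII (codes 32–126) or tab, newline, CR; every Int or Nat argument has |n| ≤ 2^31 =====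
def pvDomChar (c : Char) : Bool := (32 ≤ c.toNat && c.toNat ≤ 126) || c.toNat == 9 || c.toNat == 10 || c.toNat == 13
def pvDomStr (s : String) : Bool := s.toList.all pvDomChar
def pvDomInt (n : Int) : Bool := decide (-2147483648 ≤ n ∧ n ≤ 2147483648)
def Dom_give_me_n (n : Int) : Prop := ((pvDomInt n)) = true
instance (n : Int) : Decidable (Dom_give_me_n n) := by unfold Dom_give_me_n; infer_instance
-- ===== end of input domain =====

-- B replaces A's accumulate-and-remeasure loop by an analytic stopping bound
-- (isqrt of the triangular inequality) and a single generating pass; objective: alternative.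

-- shared helper: the characters contributed by i, i.e. str(i)*i
def pvBlock (i : Nat) : List Char :=
  (List.replicate i (PySem.Int.toChars (i : Int))).flatten

-- str(i) is never empty, so block i has at least i characters (needed by the loop's decreasing_by)
theorem pvToDigits_ne_nil (b n : Nat) : Nat.toDigits b n ≠ [] := by
  unfold Nat.toDigits
  have h : ∀ f n (acc : List Char), acc ≠ [] → Nat.toDigitsCore b f n acc ≠ [] := by
    intro f
    induction f with
    | zero => intro n acc h; simpa [Nat.toDigitsCore]
    | succ f ih =>
      intro n acc h
      simp only [Nat.toDigitsCore]
      split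
      · simpa
      · exact ih _ _ (by simp)
  simp only [Nat.toDigitsCore]
  split
  · simp
  · exact h _ _ _ (by simp)

theorem pvBlock_len_ge (i : Nat) : i ≤ (pvBlock i).length := by
  have hne : PySem.Int.toChars (i : Int) ≠ [] := by
    unfold PySem.Int.toChars
    rw [if_neg (by omega : ¬ ((i : Int) < 0))]
    exact pvToDigits_ne_nil 10 _
  have h1 : 1 ≤ (PySem.Int.toChars (i : Int)).length := by
    cases h : PySem.Int.toChars (i : Int) with
    | nil => exact absurd h hne
    | cons a l => simp
  have hlen : (pvBlock i).length = i * (PySem.Int.toChars (i : Int)).length := by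
    simp [pvBlock, List.length_flatten, List.map_replicate, List.sum_replicate, smul_eq_mul]
  calc i = i * 1 := (Nat.mul_one i).symm
    _ ≤ i * (PySem.Int.toChars (i : Int)).length := Nat.mul_le_mul_left i h1
    _ = (pvBlock i).length := hlen.symm

-- ===== PORT A =====
-- A's while-loop: append str(current_number)*current_number, stop once len(result) >= n.
-- The string accumulation is ported on List Char (exact: String.mk at the end).
-- (current_number += 1 and the reassignment of result are inlined at each occurrence)
def give_me_n_loop (n : Nat) (result : List Char) (cur : Nat) : List Char :=
  if n ≤ (result ++ pvBlock (cur + 1)).length then (result ++ pvBlock (cur + 1)).take n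
  else give_me_n_loop n (result ++ pvBlock (cur + 1)) (cur + 1)
termination_by n - result.length
decreasing_by
  have := pvBlock_len_ge (cur + 1)
  simp only [List.length_append] at *
  omega

def give_me_n (n : Int) : String :=
  -- int(n) on an int argument is the identity, so the ValueError branch cannot fire here
  if n < 1 then "Нужно целое положительное число от 1"
  else String.mk (give_me_n_loop n.toNat [] 0)

-- ===== PORT B =====
def give_me_n_alt (n : Int) : String :=
  if n < 1 then "Нужно целое положительное число от 1"
  else
    -- k = (math.isqrt(8*n - 7) + 1) // 2 : all quantities nonnegative, so Nat arithmetic is exact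
    let k : Nat := (Nat.sqrt (8 * n - 7).toNat + 1) / 2
    -- ''.join(str(i)*i for i in range(1, k+1))[:n]
    String.mk (((List.range' 1 k).flatMap pvBlock).take n.toNat)

-- ===== PRECONDITION & SPEC =====
def Spec_give_me_n (n : Int) (out : String) : Prop := out = give_me_n_alt n
instance (n : Int) (out : String) : Decidable (Spec_give_me_n n out) := by unfold Spec_give_me_n; infer_instance

-- ===== CLAIM (what is proved, stated in full; the proofs are below) =====
def Claim_equal_give_me_n : Prop := ∀ (n : Int), Dom_give_me_n n → Spec_give_me_n n (give_me_n n)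

-- ===== LEMMAS AND PROOFS =====

-- the concatenation of blocks 1..m
def pvF (m : Nat) : List Char := (List.range' 1 m).flatMap pvBlock

theorem pvF_succ (m : Nat) : pvF (m + 1) = pvF m ++ pvBlock (m + 1) := by
  simp [pvF, List.range'_1_concat, Nat.add_comm]

theorem pvF_prefix {a b : Nat} (h : a ≤ b) : pvF a <+: pvF b := by
  induction b with
  | zero =>
    have : a = 0 := Nat.le_zero.mp h
    subst this; exact List.prefix_rfl
  | succ b ih =>
    rcases Nat.lt_or_ge a (b + 1) with h' | h'
    · exact (ih (by omega)).trans (by rw [pvF_succ]; exact List.prefix_append _ _)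
    · have : a = b + 1 := by omega
      subst this; exact List.prefix_rfl

theorem pvF_take_eq {a b n : Nat} (ha : n ≤ (pvF a).length) (hb : n ≤ (pvF b).length) :
    (pvF a).take n = (pvF b).take n := by
  rcases Nat.le_total a b with h | h
  · exact List.IsPrefix.eq_of_length ((pvF_prefix h).take n) (by simp; omega)
  · exact (List.IsPrefix.eq_of_length ((pvF_prefix h).take n) (by simp; omega)).symm

theorem pvF_len (m : Nat) : m * (m + 1) ≤ 2 * (pvF m).length := by
  induction m with
  | zero => simp [pvF]
  | succ m ih =>
    have hb := pvBlock_len_ge (m + 1)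
    rw [pvF_succ]
    simp only [List.length_append]
    have e : (m + 1) * (m + 1 + 1) = m * (m + 1) + 2 * (m + 1) := by ring
    omega

theorem pv_loop_eq (fuel : Nat) : ∀ (n K cur : Nat), n - (pvF cur).length ≤ fuel →
    n ≤ (pvF K).length → (pvF cur).length < n →
    give_me_n_loop n (pvF cur) cur = (pvF K).take n := by
  induction fuel with
  | zero => intro n K cur hf _ hlt; omega
  | succ fuel ih =>
    intro n K cur hf hK hlt
    unfold give_me_n_loop
    rw [← pvF_succ]
    split
    · next h => exact pvF_take_eq h hK
    · next h =>
      have hb := pvBlock_len_ge (cur + 1)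
      have hlen : (pvF cur).length + (cur + 1) ≤ (pvF (cur + 1)).length := by
        rw [pvF_succ]; simp only [List.length_append]; omega
      exact ih n K (cur + 1) (by omega) hK (by omega)

-- the analytic k of B satisfies the triangular bound, so pvF k is long enough
theorem pv_k_big (N : Nat) (hN : 1 ≤ N) :
    N ≤ (pvF ((Nat.sqrt (8 * N - 7) + 1) / 2)).length := by
  set s := Nat.sqrt (8 * N - 7) with hs
  set k := (s + 1) / 2 with hk
  have h2 : 8 * N - 7 < (s + 1) * (s + 1) := by
    have := Nat.lt_succ_sqrt' (8 * N - 7)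
    simpa [hs, pow_two, Nat.succ_eq_add_one] using this
  have hk1 : 1 ≤ k := by
    have hs1 : 1 ≤ s := by
      by_contra hcon
      have : s = 0 := by omega
      rw [this] at h2; omega
    omega
  have hkk : 2 * N ≤ k * (k + 1) := by
    have e2 : k * (k + 1) = k * k + k := by ring
    rcases (by omega : s + 1 = 2 * k ∨ s + 1 = 2 * k + 1) with h | h
    · have e : (s + 1) * (s + 1) = 4 * (k * k) := by rw [h]; ring
      omega
    · have e : (s + 1) * (s + 1) = 4 * (k * k) + 4 * k + 1 := by rw [h]; ring
      obtain ⟨t, ht⟩ := Nat.even_mul_succ_self k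
      omega
  have hlen := pvF_len k
  omega

theorem give_me_n_spec : Claim_equal_give_me_n := by
  intro n _
  unfold Spec_give_me_n give_me_n give_me_n_alt
  by_cases h : n < 1
  · rw [if_pos h, if_pos h]
  · rw [if_neg h, if_neg h]
    rw [show ((8 : Int) * n - 7).toNat = 8 * n.toNat - 7 from by omega]
    have hn : 1 ≤ n.toNat := by omega
    have hK := pv_k_big n.toNat hn
    have hF0 : pvF 0 = [] := rfl
    have h0 : (pvF 0).length < n.toNat := by rw [hF0]; simp only [List.length_nil]; omega
    have hmain := pv_loop_eq (n.toNat - (pvF 0).length) n.toNat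
      ((Nat.sqrt (8 * n.toNat - 7) + 1) / 2) 0 (le_refl _) hK h0
    rw [hF0] at hmain
    show String.mk (give_me_n_loop n.toNat [] 0)
        = String.mk ((pvF ((Nat.sqrt (8 * n.toNat - 7) + 1) / 2)).take n.toNat)
    exact congrArg String.mk hmain
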